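-- pv_equiv track=rewrite | github.com/jasminenoack/Reinforcement-Learning | tic_tac_logic/agents/mask_agent.py | options_with_one_choice
-- ===== SOURCE A (Python) =====
-- from collections import defaultdict
--
-- def options_with_one_choice(
--     possible_moves: set[tuple[tuple[int, int], str]]
-- ) -> set[tuple[tuple[int, int], str]]:
--     by_coordinate: dict[tuple[int, int], set[str]] = defaultdict(set)
--     for cell, symbol in possible_moves:
--         by_coordinate[cell].add(symbol)
--
--     return {
--         (cell, symbols.pop())
--         for cell, symbols in by_coordinate.items()
--         if len(symbols) == 1
--     }
-- ===== SOURCE B (Python) =====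
-- def options_with_one_choice(
--     possible_moves: set[tuple[tuple[int, int], str]]
-- ) -> set[tuple[tuple[int, int], str]]:
--     return {
--         (cell, symbol)
--         for cell, symbol in possible_moves
--         if not any(c == cell and s != symbol for c, s in possible_moves)
--     }
-- ===== Notes on version B (the rewrite author's own statement) =====
-- stated objective: alternative
-- what changed: B drops A's per-cell grouping dict entirely: it keeps each (cell, symbol) pair of the original set for which no other pair with the same cell (hence a different symbol) exists, found by a direct inner scan of the set.
import Mathlib
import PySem

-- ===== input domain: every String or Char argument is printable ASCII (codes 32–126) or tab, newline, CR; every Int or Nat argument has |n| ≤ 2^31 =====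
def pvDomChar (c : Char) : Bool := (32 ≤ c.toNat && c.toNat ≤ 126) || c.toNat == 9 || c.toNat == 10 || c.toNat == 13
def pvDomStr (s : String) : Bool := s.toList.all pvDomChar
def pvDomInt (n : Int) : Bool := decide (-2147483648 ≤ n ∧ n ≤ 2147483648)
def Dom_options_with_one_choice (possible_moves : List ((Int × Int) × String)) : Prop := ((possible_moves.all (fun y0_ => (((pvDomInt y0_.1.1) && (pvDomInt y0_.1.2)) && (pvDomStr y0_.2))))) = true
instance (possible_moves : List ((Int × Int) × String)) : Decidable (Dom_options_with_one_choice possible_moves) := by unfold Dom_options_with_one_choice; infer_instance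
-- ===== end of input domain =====

-- B drops A's per-cell grouping dict entirely: one filtering pass that keeps a pair iff an inner
-- scan finds no other pair with the same cell (objective: alternative, no speed claim).

-- ===== PORT A =====
def options_with_one_choice (possible_moves : List ((Int × Int) × String)) : List ((Int × Int) × String) :=
  let by_coordinate : PySem.Dict (Int × Int) (PySem.Set String) :=
    possible_moves.foldl (fun d p => d.modify p.1 PySem.Set.empty (fun s => s.add p.2)) PySem.Dict.empty
  -- set comprehension over the dict items; symbols.pop() on a 1-element set is its sole element
  PySem.Set.ofList
    ((by_coordinate.items.filter (fun cs => cs.2.length == 1)).map (fun cs => (cs.1, cs.2.headD "")))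

-- ===== PORT B =====
def options_with_one_choice_alt (possible_moves : List ((Int × Int) × String)) : List ((Int × Int) × String) :=
  PySem.Set.ofList
    (possible_moves.filter (fun p =>
      !(possible_moves.any (fun q => q.1 == p.1 && !(q.2 == p.2)))))

-- ===== PRECONDITION & SPEC =====
-- The Python argument is a set, so its elements are distinct; Pre_ states exactly that
-- (on a list with duplicate pairs the two ports may differ, but no Python set produces one).
def Pre_options_with_one_choice (possible_moves : List ((Int × Int) × String)) : Prop :=
  possible_moves.Nodup
instance (possible_moves : List ((Int × Int) × String)) : Decidable (Pre_options_with_one_choice possible_moves) := by unfold Pre_options_with_one_choice; infer_instance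

def pvWitness_options_with_one_choice : (List ((Int × Int) × String)) :=
  [((0, 0), "x"), ((0, 1), "x"), ((0, 1), "o")]

def Spec_options_with_one_choice (possible_moves : List ((Int × Int) × String)) (out : List ((Int × Int) × String)) : Prop := out = options_with_one_choice_alt possible_moves
instance (possible_moves : List ((Int × Int) × String)) (out : List ((Int × Int) × String)) : Decidable (Spec_options_with_one_choice possible_moves out) := by unfold Spec_options_with_one_choice; infer_instance

-- ===== CLAIM (what is proved, stated in full; the proofs are below) =====
def Claim_equal_options_with_one_choice : Prop := ∀ (possible_moves : List ((Int × Int) × String)), Dom_options_with_one_choice possible_moves → Pre_options_with_one_choice possible_moves → Spec_options_with_one_choice possible_moves (options_with_one_choice possible_moves)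

-- ===== LEMMAS AND PROOFS =====

-- the grouping fold, read back per key: the symbols of cell c, added in order
theorem getD_fold_group (l : List ((Int × Int) × String))
    (d : PySem.Dict (Int × Int) (PySem.Set String)) (c : Int × Int) :
    (l.foldl (fun d p => d.modify p.1 PySem.Set.empty (fun s => s.add p.2)) d).getD c PySem.Set.empty
      = (l.filter (fun p => p.1 == c)).foldl (fun s p => s.add p.2) (d.getD c PySem.Set.empty) := by
  induction l generalizing d with
  | nil => rfl
  | cons p l ih =>
    simp only [List.foldl_cons, List.filter_cons]
    by_cases h : p.1 = c
    · subst h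
      simp only [beq_self_eq_true, if_true, List.foldl_cons]
      rw [ih, PySem.Dict.getD_modify_self]
    · have hne : (p.1 == c) = false := beq_eq_false_iff_ne.mpr h
      simp only [hne, Bool.false_eq_true, if_false]
      rw [ih, PySem.Dict.getD_modify_of_ne d PySem.Set.empty (fun s => s.add p.2) (Ne.symm h)]

-- filtering a dedup by a predicate that only holds for elements of multiplicity ≤ 1 keeps the raw order
theorem foldl_add_filter {α : Type} [BEq α] [LawfulBEq α] (xs : List α) (q : α → Bool) :
    ∀ (s : PySem.Set α), s.Nodup → (∀ a, q a = true → xs.count a + s.count a ≤ 1) →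
      (xs.foldl PySem.Set.add s).filter q = s.filter q ++ xs.filter q := by
  induction xs with
  | nil => intro s _ _; simp
  | cons x xs ih =>
    intro s hs h
    simp only [List.foldl_cons, List.filter_cons]
    by_cases hx : x ∈ s
    · have hadd : PySem.Set.add s x = s := by
        simp [PySem.Set.add, PySem.Set.contains, hx]
      have hqx : q x = false := by
        by_contra hq
        have h2 := h x (by simpa using hq)
        have hc : 1 ≤ s.count x := List.one_le_count_iff.mpr hx
        simp [List.count_cons_self] at h2
        omega
      rw [hadd, ih s hs (fun a ha => by
        have h2 := h a ha
        rcases eq_or_ne x a with rfl | hne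
        · rw [hqx] at ha; cases ha
        · have hxa : (x == a) = false := beq_eq_false_iff_ne.mpr hne
          simp [List.count_cons, hxa] at h2
          omega)]
      simp [hqx]
    · have hadd : PySem.Set.add s x = s ++ [x] := by
        simp [PySem.Set.add, PySem.Set.contains, hx]
      have hdisj : s.Disjoint [x] := by
        intro a ha hax
        simp only [List.mem_singleton] at hax
        exact hx (hax ▸ ha)
      rw [hadd, ih (s ++ [x]) (hs.append (List.nodup_singleton x) hdisj) (fun a ha => by
        have h2 := h a ha
        rcases eq_or_ne x a with rfl | hne
        · simp [List.count_cons_self] at h2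
          simp [List.count_append]
          omega
        · have hxa : (x == a) = false := beq_eq_false_iff_ne.mpr hne
          have haxb : (a == x) = false := beq_eq_false_iff_ne.mpr (Ne.symm hne)
          simp [List.count_cons, List.count_append, hxa] at h2 ⊢
          omega)]
      by_cases hq : q x
      · simp [hq]
      · simp [hq]

-- a pair whose cell occurs exactly once is the whole filter by its cell
theorem filter_eq_singleton (pm : List ((Int × Int) × String)) (p : (Int × Int) × String)
    (hp : p ∈ pm) (h1 : pm.countP (fun x => x.1 == p.1) = 1) :
    pm.filter (fun x => x.1 == p.1) = [p] := by
  have hmem : p ∈ pm.filter (fun x => x.1 == p.1) := List.mem_filter.mpr ⟨hp, by simp⟩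
  have hlen : (pm.filter (fun x => x.1 == p.1)).length = 1 := by
    rw [← List.countP_eq_length_filter]; exact h1
  obtain ⟨a, ha⟩ := List.length_eq_one_iff.mp hlen
  rw [ha] at hmem ⊢
  simp only [List.mem_singleton] at hmem
  rw [hmem]

-- under Nodup, the symbols grouped at one cell are already distinct
theorem syms_nodup (pm : List ((Int × Int) × String)) (hnd : pm.Nodup) (c : Int × Int) :
    ((pm.filter (fun p => p.1 == c)).map (fun p => p.2)).Nodup := by
  refine List.Nodup.map_on ?_ (hnd.filter _)
  intro x hx y hy hxy
  have hx1 : x.1 = c := by simpa using (List.mem_filter.mp hx).2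
  have hy1 : y.1 = c := by simpa using (List.mem_filter.mp hy).2
  exact Prod.ext (hx1.trans hy1.symm) hxy

-- ofList of a Nodup list is the list itself
theorem ofList_eq_self {α : Type} [BEq α] [LawfulBEq α] (xs : List α) (h : xs.Nodup) :
    PySem.Set.ofList xs = xs := by
  have h2 := foldl_add_filter xs (fun _ => true) [] List.nodup_nil
    (fun a _ => by simpa using List.nodup_iff_count_le_one.mp h a)
  simpa [PySem.Set.ofList_eq_foldl] using h2

-- B's inner scan, under Nodup and membership, tests exactly 'the cell occurs once'
theorem any_other_iff_count (pm : List ((Int × Int) × String)) (hnd : pm.Nodup)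
    (p : (Int × Int) × String) (hp : p ∈ pm) :
    (!(pm.any (fun q => q.1 == p.1 && !(q.2 == p.2))))
      = (pm.countP (fun x => x.1 == p.1) == 1) := by
  by_cases h : ∃ q ∈ pm, q.1 = p.1 ∧ q.2 ≠ p.2
  · obtain ⟨q, hq, hq1, hq2⟩ := h
    have hany : pm.any (fun q => q.1 == p.1 && !(q.2 == p.2)) = true := by
      refine List.any_eq_true.mpr ⟨q, hq, ?_⟩
      simp [hq1, hq2]
    have hneq : q ≠ p := fun he => hq2 (by rw [he])
    have hcount : 2 ≤ pm.countP (fun x => x.1 == p.1) := by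
      rw [List.countP_eq_length_filter]
      have hfn : (pm.filter (fun x => x.1 == p.1)).Nodup := hnd.filter _
      have hpm : p ∈ pm.filter (fun x => x.1 == p.1) := List.mem_filter.mpr ⟨hp, by simp⟩
      have hqm : q ∈ pm.filter (fun x => x.1 == p.1) := List.mem_filter.mpr ⟨hq, by simp [hq1]⟩
      have hsub : [q, p] ⊆ pm.filter (fun x => x.1 == p.1) := by
        intro x hx
        simp only [List.mem_cons, List.not_mem_nil, or_false] at hx
        rcases hx with rfl | rfl
        · exact hqm
        · exact hpm
      have hnd2 : ([q, p] : List _).Nodup := by simp [hneq]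
      have := (List.subperm_of_subset hnd2 hsub).length_le
      simpa using this
    have : (pm.countP (fun x => x.1 == p.1) == 1) = false := by
      simp only [beq_eq_false_iff_ne]
      omega
    simp [hany, this]
  · push Not at h
    have hany : pm.any (fun q => q.1 == p.1 && !(q.2 == p.2)) = false := by
      rw [List.any_eq_false]
      intro q hq
      by_cases h1 : q.1 = p.1
      · have := h q hq h1
        simp [h1, this]
      · simp [h1]
    have hall : ∀ x ∈ pm, (x.1 == p.1) = true → x = p := by
      intro x hx hx1
      have hx1' : x.1 = p.1 := by simpa using hx1
      exact Prod.ext hx1' (h x hx hx1')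
    have hcount : pm.countP (fun x => x.1 == p.1) = 1 := by
      rw [List.countP_eq_length_filter]
      have hpm : p ∈ pm.filter (fun x => x.1 == p.1) := List.mem_filter.mpr ⟨hp, by simp⟩
      have hfn : (pm.filter (fun x => x.1 == p.1)).Nodup := hnd.filter _
      have hsubp : ∀ x ∈ pm.filter (fun x => x.1 == p.1), x = p := by
        intro x hx
        have := List.mem_filter.mp hx
        exact hall x this.1 this.2
      rcases heq : pm.filter (fun x => x.1 == p.1) with _ | ⟨a, t⟩
      · rw [heq] at hpm; cases hpm
      · rw [heq] at hsubp hfn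
        have ha : a = p := hsubp a (by simp)
        have ht : t = [] := by
          rcases t with _ | ⟨b, t'⟩
          · rfl
          · have hb : b = p := hsubp b (by simp)
            have : a ∉ (b :: t') := (List.nodup_cons.mp hfn).1
            exact absurd (by simp [ha, hb]) this
        simp [heq, ht]
    simp [hany, hcount]

theorem count_map_fst (pm : List ((Int × Int) × String)) (c : Int × Int) :
    (pm.map (fun p => p.1)).count c = pm.countP (fun p => p.1 == c) := by
  simp [List.count_eq_countP, List.countP_map, Function.comp_def]

-- ===== VERDICT (by name: the statement is the Claim_ definition above) =====
theorem options_with_one_choice_spec : Claim_equal_options_with_one_choice := by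
  intro pm _ hnd
  show options_with_one_choice pm = options_with_one_choice_alt pm
  unfold options_with_one_choice options_with_one_choice_alt
  simp only []
  -- B's filter, as a plain count condition
  have hB : pm.filter (fun p => !(pm.any (fun q => q.1 == p.1 && !(q.2 == p.2))))
      = pm.filter (fun p => pm.countP (fun x => x.1 == p.1) == 1) := by
    refine List.filter_congr (fun p hp => ?_)
    exact any_other_iff_count pm hnd p hp
  rw [hB]
  congr 1
  -- A's dict: its keys and per-key values
  have hkeysnd : (pm.foldl (fun d p => d.modify p.1 PySem.Set.empty (fun s => s.add p.2))
      (PySem.Dict.empty : PySem.Dict (Int × Int) (PySem.Set String))).keys.Nodup := by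
    refine PySem.Dict.nodup_keys_foldl_modify_key pm (fun p => p.1) PySem.Set.empty _ _ ?_
    simp [PySem.Dict.keys_empty]
  have hkeys : (pm.foldl (fun d p => d.modify p.1 PySem.Set.empty (fun s => s.add p.2))
      (PySem.Dict.empty : PySem.Dict (Int × Int) (PySem.Set String))).keys
      = PySem.Set.ofList (pm.map (fun p => p.1)) := by
    rw [PySem.Dict.keys_foldl_modify_key, PySem.Dict.keys_empty, PySem.Set.ofList_eq_foldl]
    rfl
  rw [PySem.Dict.items_eq_map_keys _ hkeysnd PySem.Set.empty, hkeys]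
  have hget : ∀ c : Int × Int,
      (pm.foldl (fun d p => d.modify p.1 PySem.Set.empty (fun s => s.add p.2))
        (PySem.Dict.empty : PySem.Dict (Int × Int) (PySem.Set String))).getD c PySem.Set.empty
      = (pm.filter (fun p => p.1 == c)).map (fun p => p.2) := by
    intro c
    rw [getD_fold_group]
    have hfm : ∀ l : List ((Int × Int) × String),
        List.foldl (fun (s : PySem.Set String) p => PySem.Set.add s p.2) [] l
          = PySem.Set.ofList (l.map (fun p => p.2)) := by
      intro l
      rw [PySem.Set.ofList_eq_foldl, List.foldl_map]
    rw [show (PySem.Dict.empty : PySem.Dict (Int × Int) (PySem.Set String)).getD c PySem.Set.empty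
          = ([] : PySem.Set String) from rfl,
        hfm, ofList_eq_self _ (syms_nodup pm hnd c)]
  simp only [List.filter_map, List.map_map, Function.comp_def, hget]
  have hlen : ∀ c : Int × Int, ((pm.filter (fun p => p.1 == c)).map (fun p => p.2)).length
      = pm.countP (fun x => x.1 == c) := by
    intro c
    rw [List.length_map, ← List.countP_eq_length_filter]
  simp only [hlen]
  -- dedup-filter = raw filter, since the kept cells have multiplicity 1
  have hG : (PySem.Set.ofList (pm.map (fun p => p.1))).filter
        (fun c => pm.countP (fun x => x.1 == c) == 1)
      = (pm.map (fun p => p.1)).filter (fun c => pm.countP (fun x => x.1 == c) == 1) := by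
    rw [PySem.Set.ofList_eq_foldl]
    have h3 := foldl_add_filter (pm.map (fun p => p.1))
      (fun c => pm.countP (fun x => x.1 == c) == 1) []
      List.nodup_nil (fun a ha => by
        rw [count_map_fst]
        have h4 : pm.countP (fun x => x.1 == a) = 1 := by simpa using ha
        simp [h4])
    simpa using h3
  rw [hG, List.filter_map, List.map_map]
  have hid : ∀ p ∈ pm.filter ((fun c => pm.countP (fun x => x.1 == c) == 1) ∘ fun p => p.1),
      ((fun c => (c, ((pm.filter (fun p => p.1 == c)).map (fun p => p.2)).headD "")) ∘
        fun p => p.1) p = p := by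
    intro p hp
    have hp1 : p ∈ pm := (List.mem_filter.mp hp).1
    have hp2 : pm.countP (fun x => x.1 == p.1) = 1 := by
      have := (List.mem_filter.mp hp).2
      simpa [Function.comp_def] using this
    have h5 := filter_eq_singleton pm p hp1 hp2
    show (p.1, ((pm.filter (fun x => x.1 == p.1)).map (fun p => p.2)).headD "") = p
    rw [h5]
    simp
  rw [List.map_congr_left hid]
  simp only [List.map_id']
  refine List.filter_congr (fun p _ => ?_)
  rfl
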